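-- pv_equiv track=rewrite | github.com/Ananta-dot/PB_POC | graph.py | covers_grid_closed
-- ===== SOURCE A (Python) =====
-- def covers_grid_closed(rects, pts):
--     C=[]
--     for (x,y) in pts:
--         S=[]
--         for i,((x1,x2),(y1,y2)) in enumerate(rects):
--             if (x1 <= x <= x2) and (y1 <= y <= y2):
--                 S.append(i)
--         C.append(S)
--     return C
-- ===== SOURCE B (Python) =====
-- def covers_grid_closed(rects, pts):
--     # Sort rectangles by left edge once; per point scan the sorted list and
--     # BREAK as soon as x1 > x (no later rectangle can contain the point),
--     # then sort the collected original indices.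
--     srt = sorted(enumerate(rects), key=lambda e: e[1][0][0])
--     out = []
--     for (x, y) in pts:
--         hits = []
--         for i, ((x1, x2), (y1, y2)) in srt:
--             if x1 > x:
--                 break
--             if x <= x2 and y1 <= y <= y2:
--                 hits.append(i)
--         hits.sort()
--         out.append(hits)
--     return out
-- ===== Notes on version B (the rewrite author's own statement) =====
-- stated objective: alternative
-- what changed: B pre-sorts the rectangles by left edge, scans the sorted list per point with an early break once x1 > x (sort-then-prune instead of A's full nested scan), and recovers index order by sorting the collected hits.
import Mathlib
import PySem

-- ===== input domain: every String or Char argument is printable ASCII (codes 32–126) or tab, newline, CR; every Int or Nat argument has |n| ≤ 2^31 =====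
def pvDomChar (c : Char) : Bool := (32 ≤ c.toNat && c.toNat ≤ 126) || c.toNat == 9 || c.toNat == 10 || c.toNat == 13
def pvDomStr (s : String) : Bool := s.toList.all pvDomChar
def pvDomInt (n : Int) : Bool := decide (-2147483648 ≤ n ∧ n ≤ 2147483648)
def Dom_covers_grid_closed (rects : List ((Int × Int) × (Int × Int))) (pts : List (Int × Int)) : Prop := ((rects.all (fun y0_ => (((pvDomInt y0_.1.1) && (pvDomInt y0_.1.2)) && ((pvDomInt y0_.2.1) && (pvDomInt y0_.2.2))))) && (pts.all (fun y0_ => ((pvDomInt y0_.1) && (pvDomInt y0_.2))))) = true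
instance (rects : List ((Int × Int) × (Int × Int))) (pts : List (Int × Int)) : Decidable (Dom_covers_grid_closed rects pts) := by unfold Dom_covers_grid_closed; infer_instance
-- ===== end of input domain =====

-- B sorts the rectangles by left edge once, scans the sorted list per point with an early
-- break when x1 > x, and sorts the collected indices; same return value as A (alternative
-- decomposition, no speed claim).

-- ===== PORT A =====
-- Point-major full scan: for each point, test every rectangle, appending indices in order.
def covers_grid_closed (rects : List ((Int × Int) × (Int × Int))) (pts : List (Int × Int)) : List (List Int) :=
  pts.foldl (fun C p =>
    C ++ [ (PySem.List.enumerate rects).foldl (fun S e =>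
             if e.2.1.1 ≤ p.1 ∧ p.1 ≤ e.2.1.2 ∧ e.2.2.1 ≤ p.2 ∧ p.2 ≤ e.2.2.2
             then S ++ [e.1] else S) [] ]) []

-- ===== PORT B =====
-- Inner loop of B: scan the x1-sorted rectangle list, break ('return hits') on x1 > x.
def pvScanHits (x y : Int) : List (Int × ((Int × Int) × (Int × Int))) → List Int → List Int
  | [], hits => hits
  | e :: rest, hits =>
      if e.2.1.1 > x then hits
      else if x ≤ e.2.1.2 ∧ e.2.2.1 ≤ y ∧ y ≤ e.2.2.2 then pvScanHits x y rest (hits ++ [e.1])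
      else pvScanHits x y rest hits

def covers_grid_closed_alt (rects : List ((Int × Int) × (Int × Int))) (pts : List (Int × Int)) : List (List Int) :=
  let srt := PySem.List.sorted (PySem.List.enumerate rects) (fun e => e.2.1.1) false
  pts.foldl (fun out p =>
    out ++ [ PySem.List.sorted (pvScanHits p.1 p.2 srt []) (fun v => v) false ]) []

-- ===== PRECONDITION & SPEC =====
def Spec_covers_grid_closed (rects : List ((Int × Int) × (Int × Int))) (pts : List (Int × Int)) (out : List (List Int)) : Prop := out = covers_grid_closed_alt rects pts
instance (rects : List ((Int × Int) × (Int × Int))) (pts : List (Int × Int)) (out : List (List Int)) : Decidable (Spec_covers_grid_closed rects pts out) := by unfold Spec_covers_grid_closed; infer_instance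

-- ===== CLAIM (what is proved, stated in full; the proofs are below) =====
def Claim_equal_covers_grid_closed : Prop := ∀ (rects : List ((Int × Int) × (Int × Int))) (pts : List (Int × Int)), Dom_covers_grid_closed rects pts → Spec_covers_grid_closed rects pts (covers_grid_closed rects pts)

-- ===== LEMMAS AND PROOFS =====

-- The break loop is: append, over the ≤-x prefix, the indices of rectangles containing the point.
theorem pv_scan_eq (x y : Int) :
    ∀ (l : List (Int × ((Int × Int) × (Int × Int)))) (hits : List Int),
      pvScanHits x y l hits
        = hits ++ ((l.takeWhile (fun e => decide (e.2.1.1 ≤ x))).filter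
            (fun e => decide (x ≤ e.2.1.2 ∧ e.2.2.1 ≤ y ∧ y ≤ e.2.2.2))).map (·.1) := by
  intro l
  induction l with
  | nil => intro hits; simp [pvScanHits]
  | cons e rest ih =>
      intro hits
      by_cases hb : e.2.1.1 > x
      · simp [pvScanHits, hb, List.takeWhile, not_le.mpr hb]
      · have hle : e.2.1.1 ≤ x := not_lt.mp hb
        by_cases hq : x ≤ e.2.1.2 ∧ e.2.2.1 ≤ y ∧ y ≤ e.2.2.2
        · simp [pvScanHits, hb, hq, List.takeWhile, hle, ih]
        · simp [pvScanHits, hb, hq, List.takeWhile, hle, ih]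

-- takeWhile-then-filter over a list whose order makes the cut downward closed is one filter.
theorem pv_takeWhile_filter {α : Type} (c Q : α → Bool) :
    ∀ (l : List α), l.Pairwise (fun a b => c b = true → c a = true) →
      (l.takeWhile c).filter Q = l.filter (fun e => c e && Q e) := by
  intro l
  induction l with
  | nil => intro _; simp
  | cons a t ih =>
      intro hp
      rcases List.pairwise_cons.mp hp with ⟨ha, ht⟩
      by_cases hc : c a = true
      · simp [List.takeWhile, hc, List.filter, ih ht]
      · have hca : c a = false := by
          cases h : c a with
          | true => exact absurd h hc
          | false => rfl
        have hnil : t.filter (fun e => c e && Q e) = [] := by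
          apply List.filter_eq_nil_iff.mpr
          intro b hb
          cases hcb : c b with
          | true => exact absurd (ha b hb hcb) hc
          | false => simp
        simp [hca, hnil]

-- Per point, B's sorted hit list is exactly A's in-order index list.
theorem pv_row (rects : List ((Int × Int) × (Int × Int))) (p : Int × Int) :
    PySem.List.sorted
      (pvScanHits p.1 p.2 (PySem.List.sorted (PySem.List.enumerate rects) (fun e => e.2.1.1) false) [])
      (fun v => v) false
    = (PySem.List.enumerate rects).foldl (fun S e =>
        if e.2.1.1 ≤ p.1 ∧ p.1 ≤ e.2.1.2 ∧ e.2.2.1 ≤ p.2 ∧ p.2 ≤ e.2.2.2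
        then S ++ [e.1] else S) [] := by
  have hA := PySem.List.foldl_append_ite
      (p := fun e : Int × ((Int × Int) × (Int × Int)) =>
        e.2.1.1 ≤ p.1 ∧ p.1 ≤ e.2.1.2 ∧ e.2.2.1 ≤ p.2 ∧ p.2 ≤ e.2.2.2)
      (fun e => e.1) (PySem.List.enumerate rects) ([] : List Int)
  rw [hA]
  rw [pv_scan_eq]
  rw [pv_takeWhile_filter _ _ _
        ((PySem.List.sorted_pairwise (xs := PySem.List.enumerate rects)
            (key := fun e => e.2.1.1)).imp (by intro a b hab hb; simpa using le_trans hab (by simpa using hb)))]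
  simp only [List.nil_append]
  have hfun : (fun e : Int × ((Int × Int) × (Int × Int)) =>
        decide (e.2.1.1 ≤ p.1) && decide (p.1 ≤ e.2.1.2 ∧ e.2.2.1 ≤ p.2 ∧ p.2 ≤ e.2.2.2))
      = (fun e : Int × ((Int × Int) × (Int × Int)) =>
        decide (e.2.1.1 ≤ p.1 ∧ p.1 ≤ e.2.1.2 ∧ e.2.2.1 ≤ p.2 ∧ p.2 ≤ e.2.2.2)) := by
    funext e
    by_cases h1 : e.2.1.1 ≤ p.1 <;>
      by_cases h2 : p.1 ≤ e.2.1.2 ∧ e.2.2.1 ≤ p.2 ∧ p.2 ≤ e.2.2.2 <;> simp [h1, h2]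
  rw [hfun]
  apply PySem.List.sorted_eq_of_perm_of_pairwise_lt
  · -- Perm: A's list is a rearrangement of B's collected hits
    exact ((((PySem.List.sorted_perm (PySem.List.enumerate rects) (fun e => e.2.1.1) false).filter
        _).map (·.1))).symm
  · -- A's list is strictly increasing (filter+map of strictly increasing enumerate indices)
    have h := (PySem.List.pairwise_lt_enumerate (xs := rects) (s := 0)).sublist
      (List.filter_sublist (l := PySem.List.enumerate rects)
        (p := fun e => decide (e.2.1.1 ≤ p.1 ∧ p.1 ≤ e.2.1.2 ∧ e.2.2.1 ≤ p.2 ∧ p.2 ≤ e.2.2.2)))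
    exact (List.pairwise_map).mpr h

-- ===== VERDICT (by name: the statement is the Claim_ definition above) =====
theorem covers_grid_closed_spec : Claim_equal_covers_grid_closed := by
  intro rects pts _
  show covers_grid_closed rects pts = covers_grid_closed_alt rects pts
  unfold covers_grid_closed covers_grid_closed_alt
  rw [PySem.List.foldl_append_singleton_eq_map, PySem.List.foldl_append_singleton_eq_map]
  simp only [List.nil_append]
  apply List.map_congr_left
  intro p _
  exact (pv_row rects p).symm
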